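-- pv_equiv track=rewrite | github.com/ramlimicheal/ANVIL- | anvil/extract/icons.py | _suggest_single_library
-- ===== SOURCE A (Python) =====
-- ICON_LIBRARIES = {
--     "lucide": {"style": "outline", "stroke_width": 2, "sizes": [16, 20, 24]},
--     "heroicons": {"style": "outline", "stroke_width": 1.5, "sizes": [20, 24]},
--     "phosphor": {"style": "outline", "stroke_width": 1.5, "sizes": [16, 20, 24, 32]},
--     "feather": {"style": "outline", "stroke_width": 2, "sizes": [24]},
--     "tabler": {"style": "outline", "stroke_width": 2, "sizes": [24]},
-- }
--
-- def _suggest_single_library(style: str, size: int) -> str: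
--     """Suggest the most likely icon library for a single icon."""
--     candidates = []
--     for name, props in ICON_LIBRARIES.items():
--         score = 0
--         if props["style"] == style:
--             score += 2
--         if size in props["sizes"]:
--             score += 1
--         candidates.append((name, score))
--
--     candidates.sort(key=lambda x: x[1], reverse=True)
--     return candidates[0][0] if candidates else "lucide"
-- ===== SOURCE B (Python) =====
-- # Tiered first-match search: instead of scoring every library and sorting, walk the
-- # score tiers (3,2,1,0) from best to worst and return the first library whose
-- # (style-match, size-match) pattern lands in the current tier; first max wins,
-- # matching A's stable reverse sort.
-- ICON_LIBRARIES = {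
--     "lucide": {"style": "outline", "stroke_width": 2, "sizes": [16, 20, 24]},
--     "heroicons": {"style": "outline", "stroke_width": 1.5, "sizes": [20, 24]},
--     "phosphor": {"style": "outline", "stroke_width": 1.5, "sizes": [16, 20, 24, 32]},
--     "feather": {"style": "outline", "stroke_width": 2, "sizes": [24]},
--     "tabler": {"style": "outline", "stroke_width": 2, "sizes": [24]},
-- }
--
-- def _suggest_single_library(style: str, size: int) -> str:
--     """Suggest the most likely icon library for a single icon."""
--     # every library falls in exactly one tier, so the search always returns
--     for want_style, want_size in ((True, True), (True, False), (False, True), (False, False)):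
--         for name, props in ICON_LIBRARIES.items():
--             if (props["style"] == style) == want_style and (size in props["sizes"]) == want_size:
--                 return name
-- ===== Notes on version B (the rewrite author's own statement) =====
-- stated objective: alternative
-- what changed: Replaces build-score-list-then-stable-reverse-sort with a tiered first-match search: walk the four score tiers from best to worst and return the first library whose (style-match,size-match) pattern lies in the current tier, which picks the same first maximum without building or sorting any list.
import Mathlib
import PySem

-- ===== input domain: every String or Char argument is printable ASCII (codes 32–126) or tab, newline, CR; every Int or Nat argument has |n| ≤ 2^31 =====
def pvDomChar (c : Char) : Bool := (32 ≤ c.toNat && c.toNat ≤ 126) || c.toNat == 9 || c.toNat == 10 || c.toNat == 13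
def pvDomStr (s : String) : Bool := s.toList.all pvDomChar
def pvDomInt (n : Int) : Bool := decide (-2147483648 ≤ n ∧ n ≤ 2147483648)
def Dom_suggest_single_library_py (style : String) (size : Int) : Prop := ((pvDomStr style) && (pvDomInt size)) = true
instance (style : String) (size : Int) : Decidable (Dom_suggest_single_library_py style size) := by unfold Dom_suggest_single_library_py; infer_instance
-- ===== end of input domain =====

-- B replaces A's build-score-list-then-stable-reverse-sort with a tiered first-match
-- search over the score tiers (3,2,1,0); same first-maximum result, return values only.

-- ICON_LIBRARIES as (name, (style, sizes)); the unused stroke_width field (a float A never reads) is omitted.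
def pvIconLibs : List (String × String × List Int) :=
  [("lucide",    ("outline", [16, 20, 24])),
   ("heroicons", ("outline", [20, 24])),
   ("phosphor",  ("outline", [16, 20, 24, 32])),
   ("feather",   ("outline", [24])),
   ("tabler",    ("outline", [24]))]

-- ===== PORT A =====
def suggest_single_library_py (style : String) (size : Int) : String :=
  let candidates : List (String × Int) :=
    pvIconLibs.foldl (fun acc p =>
      let score : Int :=
        (if p.2.1 == style then 2 else 0) + (if p.2.2.contains size then 1 else 0)
      acc ++ [(p.1, score)]) []
  match PySem.List.sorted candidates (fun x => x.2) true with
  | [] => "lucide"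
  | c :: _ => c.1

-- ===== PORT B =====
-- tiers in descending score order; every library lies in exactly one tier,
-- so the search always finds a name (the getD "" default is unreachable).
def suggest_single_library_py_alt (style : String) (size : Int) : String :=
  (([(true, true), (true, false), (false, true), (false, false)] : List (Bool × Bool)).findSome?
    (fun t =>
      (pvIconLibs.find? (fun p =>
        (((p.2.1 == style) == t.1) && ((p.2.2.contains size) == t.2)))).map (·.1))).getD ""

-- ===== PRECONDITION & SPEC =====
def Spec_suggest_single_library_py (style : String) (size : Int) (out : String) : Prop := out = suggest_single_library_py_alt style size
instance (style : String) (size : Int) (out : String) : Decidable (Spec_suggest_single_library_py style size out) := by unfold Spec_suggest_single_library_py; infer_instance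

-- ===== CLAIM (what is proved, stated in full; the proofs are below) =====
def Claim_equal_suggest_single_library_py : Prop := ∀ (style : String) (size : Int), Dom_suggest_single_library_py style size → Spec_suggest_single_library_py style size (suggest_single_library_py style size)

-- ===== LEMMAS AND PROOFS =====

-- ===== VERDICT (by name: the statement is the Claim_ definition above) =====
theorem suggest_single_library_py_spec : Claim_equal_suggest_single_library_py := by
  intro style size _
  unfold Spec_suggest_single_library_py
  by_cases hs : "outline" = style
  · subst hs
    by_cases h16 : size = 16
    · subst h16; decide
    · by_cases h20 : size = 20
      · subst h20; decide
      · by_cases h24 : size = 24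
        · subst h24; decide
        · by_cases h32 : size = 32
          · subst h32; decide
          · have c1 : (([16, 20, 24] : List Int).contains size) = false := by
              simp [h16, h20, h24]
            have c2 : (([20, 24] : List Int).contains size) = false := by
              simp [h20, h24]
            have c3 : (([16, 20, 24, 32] : List Int).contains size) = false := by
              simp [h16, h20, h24, h32]
            have c4 : (([24] : List Int).contains size) = false := by
              simp [h24]
            simp only [suggest_single_library_py, suggest_single_library_py_alt, pvIconLibs,
                       List.foldl, List.findSome?, List.find?, c1, c2, c3, c4]
            decide
  · have hb : ("outline" == style) = false := beq_eq_false_iff_ne.mpr hs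
    by_cases h16 : size = 16
    · subst h16
      simp only [suggest_single_library_py, suggest_single_library_py_alt, pvIconLibs,
                 List.foldl, List.findSome?, List.find?, hb]
      decide
    · by_cases h20 : size = 20
      · subst h20
        simp only [suggest_single_library_py, suggest_single_library_py_alt, pvIconLibs,
                   List.foldl, List.findSome?, List.find?, hb]
        decide
      · by_cases h24 : size = 24
        · subst h24
          simp only [suggest_single_library_py, suggest_single_library_py_alt, pvIconLibs,
                     List.foldl, List.findSome?, List.find?, hb]
          decide
        · by_cases h32 : size = 32
          · subst h32
            simp only [suggest_single_library_py, suggest_single_library_py_alt, pvIconLibs,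
                       List.foldl, List.findSome?, List.find?, hb]
            decide
          · have c1 : (([16, 20, 24] : List Int).contains size) = false := by
              simp [h16, h20, h24]
            have c2 : (([20, 24] : List Int).contains size) = false := by
              simp [h20, h24]
            have c3 : (([16, 20, 24, 32] : List Int).contains size) = false := by
              simp [h16, h20, h24, h32]
            have c4 : (([24] : List Int).contains size) = false := by
              simp [h24]
            simp only [suggest_single_library_py, suggest_single_library_py_alt, pvIconLibs,
                       List.foldl, List.findSome?, List.find?, hb, c1, c2, c3, c4]
            decide
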